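-- pv_equiv track=rewrite | github.com/oleveloper/problem-solving | programmers/148653.py | solution
-- ===== SOURCE A (Python) =====
-- def solution(storey):
--     answer, i = 0, 0
--     l = [int(x) for x in str(storey)[::-1]] + [0]
--
--     while i < len(l):
--         if l[i] > 5:
--             l[i + 1] += 1
--             answer += 10 - l[i]
--         else:
--             if l[i] == 5: l[i + 1] += 1 if l[i + 1] >= 5 else 0
--             answer += l[i]
--         i += 1
--
--     return answer
-- ===== SOURCE B (Python) =====
-- def solution(storey):
--     g0, g1 = 0, 1  # min cost of the remaining (more significant) digits with carry-in 0 / 1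
--     for d in reversed([int(x) for x in str(storey)[::-1]]):
--         g0, g1 = min(d + g0, (10 - d) + g1), min(d + 1 + g0, (9 - d) + g1)
--     return g0
-- ===== Notes on version B (the rewrite author's own statement) =====
-- stated objective: alternative
-- what changed: Replaces A's greedy left-to-right digit scan (mutating the list, with an explicit ==5 lookahead tiebreak) by a carry-indexed dynamic program: one pass over the digits from the most significant end maintaining two accumulators g0/g1 (min cost with carry-in 0/1), taking min of the round-down and round-up choice at every digit.
import Mathlib
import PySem

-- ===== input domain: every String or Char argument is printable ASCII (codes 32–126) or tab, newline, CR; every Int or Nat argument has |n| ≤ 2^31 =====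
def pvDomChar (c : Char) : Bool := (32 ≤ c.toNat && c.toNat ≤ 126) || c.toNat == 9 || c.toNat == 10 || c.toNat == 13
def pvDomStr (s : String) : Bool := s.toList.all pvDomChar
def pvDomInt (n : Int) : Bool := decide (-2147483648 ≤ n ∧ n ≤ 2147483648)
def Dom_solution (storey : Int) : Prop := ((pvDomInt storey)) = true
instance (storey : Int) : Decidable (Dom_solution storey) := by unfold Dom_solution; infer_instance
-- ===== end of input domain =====

-- B replaces A's greedy digit scan with lookahead tiebreak by a two-accumulator carry DP (objective: alternative, same O(n) cost).

-- ===== PORT A =====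
-- l = [int(x) for x in str(storey)[::-1]]  (shared by both programs; int(c) for a digit char,
-- arbitrary 0 where Python's int() raises ValueError — those inputs are outside Pre_solution)
def pyDigitsRev (storey : Int) : List Int :=
  ((PySem.Int.toStr storey).toList.reverse).map (fun c => (PySem.Int.ofChars? [c]).getD 0)

-- the while loop: state (l, i, answer); l[i+1] += … becomes List.set (a no-op where Python
-- would raise IndexError — unreachable for the lists A builds inside Pre_solution)
def solutionGo (l : List Int) (i : Nat) (answer : Int) : Int :=
  if _h : i < l.length then
    if 5 < l.getD i 0 then
      solutionGo (l.set (i+1) (l.getD (i+1) 0 + 1)) (i+1) (answer + (10 - l.getD i 0))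
    else
      solutionGo
        (if l.getD i 0 = 5 then
          l.set (i+1) (l.getD (i+1) 0 + (if 5 ≤ l.getD (i+1) 0 then 1 else 0)) else l)
        (i+1) (answer + l.getD i 0)
  else answer
termination_by l.length - i
decreasing_by
  all_goals ((try split) <;> (try simp only [List.length_set]) <;> omega)

def solution (storey : Int) : Int :=
  solutionGo (pyDigitsRev storey ++ [0]) 0 0

-- ===== PORT B =====
-- for d in reversed(l): g0, g1 = min(d+g0, (10-d)+g1), min(d+1+g0, (9-d)+g1)
def solutionAltStep (p : Int × Int) (d : Int) : Int × Int :=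
  (min (d + p.1) ((10 - d) + p.2), min (d + 1 + p.1) ((9 - d) + p.2))

def solution_alt (storey : Int) : Int :=
  (List.foldl solutionAltStep (0, 1) (pyDigitsRev storey).reverse).1

-- ===== PRECONDITION & SPEC =====
-- Pre_ excludes exactly the negative storeys, on which Python's int('-') raises ValueError in
-- both A and B (str(storey)[::-1] puts the sign character last).
def Pre_solution (storey : Int) : Prop := 0 ≤ storey
instance (storey : Int) : Decidable (Pre_solution storey) := by unfold Pre_solution; infer_instance
def pvWitness_solution : Int := (16)

def Spec_solution (storey : Int) (out : Int) : Prop := out = solution_alt storey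
instance (storey : Int) (out : Int) : Decidable (Spec_solution storey out) := by unfold Spec_solution; infer_instance

-- ===== CLAIM (what is proved, stated in full; the proofs are below) =====
def Claim_equal_solution : Prop := ∀ (storey : Int), Dom_solution storey → Pre_solution storey → Spec_solution storey (solution storey)

-- ===== LEMMAS AND PROOFS =====

-- add a carry of 1 to the least significant remaining digit (what A's l[i+1] += 1 does)
def bumpHead : List Int → List Int
  | [] => []
  | x :: t => (x + 1) :: t

theorem length_bumpHead (l : List Int) : (bumpHead l).length = l.length := by
  cases l <;> simp [bumpHead]

-- the value A's loop adds from a digit suffix onward (carry materialised in the head)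
def greedyVal : List Int → Int
  | [] => 0
  | d :: r =>
    if 5 < d then (10 - d) + greedyVal (bumpHead r)
    else if d = 5 ∧ 5 ≤ r.getD 0 0 then 5 + greedyVal (bumpHead r)
    else d + greedyVal r
termination_by l => l.length
decreasing_by all_goals (try simp only [length_bumpHead]) <;> simp

-- the optimum B computes: min cost of a digit suffix given the carry-in
def fRec : List Int → Int → Int
  | [], c => c
  | d :: r, c => min ((d + c) + fRec r 0) ((10 - (d + c)) + fRec r 1)

theorem set_drop_succ (l : List Int) (i : Nat) (v : Int) :
    (l.set (i+1) v).drop (i+1) = ((l.drop (i+1)).set 0 v) := by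
  rw [List.drop_set]; simp

theorem set_head_eq_bumpHead (l : List Int) (i : Nat) :
    (l.set (i+1) (l.getD (i+1) 0 + 1)).drop (i+1) = bumpHead (l.drop (i+1)) := by
  rw [set_drop_succ]
  cases h : l.drop (i+1) with
  | nil => simp [bumpHead]
  | cons x t =>
      have hi : i + 1 < l.length := by
        by_contra hc
        rw [List.drop_eq_nil_of_le (by omega)] at h; simp at h
      have hgx : l[i+1] = x := by
        rw [List.drop_eq_getElem_cons hi] at h
        exact (List.cons_eq_cons.mp h).1
      have hx : l.getD (i+1) 0 = x := by
        rw [List.getD_eq_getElem?_getD, List.getElem?_eq_getElem hi, Option.getD_some, hgx]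
      simp [bumpHead, List.getElem?_eq_getElem hi, hgx]

theorem set_head_self (l : List Int) (i : Nat) :
    (l.set (i+1) (l.getD (i+1) 0 + 0)).drop (i+1) = l.drop (i+1) := by
  rw [set_drop_succ]
  cases h : l.drop (i+1) with
  | nil => simp
  | cons x t =>
      have hi : i + 1 < l.length := by
        by_contra hc
        rw [List.drop_eq_nil_of_le (by omega)] at h; simp at h
      have hgx : l[i+1] = x := by
        rw [List.drop_eq_getElem_cons hi] at h
        exact (List.cons_eq_cons.mp h).1
      have hx : l.getD (i+1) 0 = x := by
        rw [List.getD_eq_getElem?_getD, List.getElem?_eq_getElem hi, Option.getD_some, hgx]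
      simp [List.getElem?_eq_getElem hi, hgx]

theorem getD_drop (l : List Int) (i : Nat) :
    (l.drop (i+1)).getD 0 0 = l.getD (i+1) 0 := by
  simp [List.getD_eq_getElem?_getD, List.getElem?_drop]

-- A's loop computes answer + greedyVal of the remaining suffix
theorem solutionGo_eq_greedyVal :
    ∀ (k : Nat) (l : List Int) (i : Nat) (ans : Int), l.length - i = k →
      solutionGo l i ans = ans + greedyVal (l.drop i) := by
  intro k
  induction k with
  | zero =>
      intro l i ans hk
      rw [solutionGo, dif_neg (by omega)]
      rw [List.drop_eq_nil_of_le (by omega)]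
      simp [greedyVal]
  | succ n ih =>
      intro l i ans hk
      have hi : i < l.length := by omega
      have hdrop : l.drop i = l[i] :: l.drop (i+1) := List.drop_eq_getElem_cons hi
      have hd : l.getD i 0 = l[i] := by
        rw [List.getD_eq_getElem?_getD, List.getElem?_eq_getElem hi, Option.getD_some]
      rw [solutionGo, dif_pos hi, hdrop]
      by_cases h5 : 5 < l.getD i 0
      · rw [if_pos h5]
        rw [ih _ _ _ (by simp only [List.length_set]; omega)]
        rw [set_head_eq_bumpHead]
        simp only [greedyVal]
        rw [if_pos (hd ▸ h5), hd]
        ring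
      · rw [if_neg h5]
        by_cases he : l.getD i 0 = 5
        · by_cases hn : 5 ≤ l.getD (i+1) 0
          · rw [if_pos he, if_pos hn]
            rw [ih _ _ _ (by simp only [List.length_set]; omega), set_head_eq_bumpHead]
            simp only [greedyVal]
            rw [if_neg (hd ▸ h5), if_pos ⟨hd ▸ he, by rw [getD_drop]; exact hn⟩, he]
            ring
          · rw [if_pos he, if_neg hn]
            rw [ih _ _ _ (by simp only [List.length_set]; omega), set_head_self]
            simp only [greedyVal]
            rw [if_neg (hd ▸ h5), if_neg (by rw [getD_drop]; rintro ⟨-, h2⟩; omega), he, ← hd, he]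
            ring
        · rw [if_neg he]
          rw [ih _ _ _ (by omega)]
          simp only [greedyVal]
          rw [if_neg (hd ▸ h5), if_neg (by rintro ⟨h1, -⟩; rw [← hd] at h1; exact he h1), hd]
          ring

def digitsOK (l : List Int) : Prop := ∀ d ∈ l, 0 ≤ d ∧ d ≤ 9

-- carry sensitivity of the optimum
theorem fRec_bounds : ∀ (l : List Int), digitsOK l →
    (fRec l 1 ≤ fRec l 0 + 1 ∧ fRec l 0 ≤ fRec l 1 + 1 ∧
     (5 ≤ l.getD 0 0 → fRec l 1 ≤ fRec l 0) ∧ (l.getD 0 0 < 5 → fRec l 0 ≤ fRec l 1)) := by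
  intro l
  induction l with
  | nil => intro _; simp [fRec]
  | cons d r ih =>
      intro hok
      have hd : 0 ≤ d ∧ d ≤ 9 := hok d (List.mem_cons_self ..)
      have hr := ih (fun x hx => hok x (List.mem_cons_of_mem _ hx))
      simp only [fRec, List.getD_cons_zero]
      omega

def addHead (c : Int) : List Int → List Int
  | [] => []
  | x :: t => (x + c) :: t

theorem addHead_one (l : List Int) : addHead 1 l = bumpHead l := by
  cases l <;> simp [addHead, bumpHead]

-- MAIN: on a digit list, A's greedy value (with the appended 0 and incoming carry c) is the optimum
theorem greedy_eq_fRec : ∀ (D : List Int), digitsOK D → ∀ (c : Int), (c = 0 ∨ c = 1) →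
    greedyVal (addHead c (D ++ [0])) = fRec D c := by
  intro D
  induction D with
  | nil =>
      intro _ c hc
      rcases hc with h | h <;> subst h <;> simp [addHead, greedyVal, fRec]
  | cons d r ih =>
      intro hok c hc
      have hd : 0 ≤ d ∧ d ≤ 9 := hok d (List.mem_cons_self ..)
      have hokr : digitsOK r := fun x hx => hok x (List.mem_cons_of_mem _ hx)
      have hb := fRec_bounds r hokr
      have hx : addHead c ((d :: r) ++ [0]) = (d + c) :: (r ++ [0]) := by
        simp [addHead]
      rw [hx]
      have hcarry : greedyVal (bumpHead (r ++ [0])) = fRec r 1 := by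
        rw [← addHead_one]; exact ih hokr 1 (Or.inr rfl)
      have hnoc : greedyVal (r ++ [0]) = fRec r 0 := by
        have := ih hokr 0 (Or.inl rfl)
        cases r with
        | nil => simpa [addHead] using this
        | cons y t => simpa [addHead] using this
      simp only [greedyVal, fRec]
      by_cases h5 : 5 < d + c
      · rw [if_pos h5, hcarry]
        exact (by omega : min ((d + c) + fRec r 0) ((10 - (d + c)) + fRec r 1) = (10 - (d + c)) + fRec r 1).symm
      · rw [if_neg h5]
        by_cases he : d + c = 5
        · by_cases hh : 5 ≤ (r ++ [0]).getD 0 0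
          · rw [if_pos ⟨he, hh⟩, hcarry]
            have hhr : 5 ≤ r.getD 0 0 := by
              cases r with
              | nil => simp at hh
              | cons y t => simpa using hh
            have h1 := hb.2.2.1 hhr
            have : min ((d + c) + fRec r 0) ((10 - (d + c)) + fRec r 1)
                = 5 + fRec r 1 := by omega
            rw [this]
          · rw [if_neg (by intro hc2; exact hh hc2.2), hnoc]
            have hhr : r.getD 0 0 < 5 := by
              cases r with
              | nil => simp
              | cons y t => simpa using hh
            have h1 := hb.2.2.2 hhr
            have : min ((d + c) + fRec r 0) ((10 - (d + c)) + fRec r 1)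
                = (d + c) + fRec r 0 := by omega
            rw [this]
        · rw [if_neg (by intro hc2; exact he hc2.1), hnoc]
          have : min ((d + c) + fRec r 0) ((10 - (d + c)) + fRec r 1)
              = (d + c) + fRec r 0 := by omega
          rw [this]

-- B's fold computes (fRec l 0, fRec l 1)
theorem foldl_rev_eq_fRec (l : List Int) :
    List.foldl solutionAltStep (0, 1) l.reverse = (fRec l 0, fRec l 1) := by
  rw [List.foldl_reverse]
  induction l with
  | nil => simp [fRec]
  | cons d r ih =>
      simp only [List.foldr_cons]
      rw [ih]
      simp only [solutionAltStep, fRec]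
      apply Prod.ext <;> simp only [] <;> omega

-- every int(c) over str(storey) for 0 ≤ storey is a digit 0..9
theorem mem_toDigits_digitChar : ∀ (n : Nat) (c : Char), c ∈ Nat.toDigits 10 n →
    ∃ d : Nat, d < 10 ∧ c = Nat.digitChar d := by
  intro n
  induction n using Nat.strong_induction_on with
  | _ n ih =>
      intro c hc
      rw [Nat.toDigits_eq_if (by norm_num)] at hc
      by_cases h : n < 10
      · rw [if_pos h] at hc
        simp at hc
        exact ⟨n, h, hc⟩
      · rw [if_neg h] at hc
        rcases List.mem_append.mp hc with h1 | h1
        · exact ih (n / 10) (Nat.div_lt_self (by omega) (by norm_num)) c h1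
        · simp at h1
          exact ⟨n % 10, Nat.mod_lt _ (by norm_num), h1⟩

theorem chInt_digitChar (d : Nat) (hd : d < 10) :
    0 ≤ (PySem.Int.ofChars? [Nat.digitChar d]).getD 0 ∧
    (PySem.Int.ofChars? [Nat.digitChar d]).getD 0 ≤ 9 := by
  interval_cases d <;> decide

theorem digitsOK_pyDigitsRev (storey : Int) (h : 0 ≤ storey) :
    digitsOK (pyDigitsRev storey) := by
  intro x hx
  unfold pyDigitsRev at hx
  rw [PySem.Int.toList_toStr] at hx
  rcases List.mem_map.mp hx with ⟨c, hc, hval⟩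
  rw [List.mem_reverse] at hc
  have : c ∈ Nat.toDigits 10 storey.toNat := by
    unfold PySem.Int.toChars at hc
    rw [if_neg (by omega)] at hc
    exact hc
  rcases mem_toDigits_digitChar _ _ this with ⟨d, hd10, rfl⟩
  rw [← hval]
  exact chInt_digitChar d hd10

theorem addHead_zero_append (D : List Int) : addHead 0 (D ++ [0]) = D ++ [0] := by
  cases D <;> simp [addHead]

-- ===== VERDICT (by name: the statement is the Claim_ definition above) =====
theorem solution_spec : Claim_equal_solution := by
  intro storey _ hpre
  unfold Spec_solution solution solution_alt
  have hok := digitsOK_pyDigitsRev storey hpre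
  rw [solutionGo_eq_greedyVal (pyDigitsRev storey ++ [0]).length _ 0 0 rfl]
  rw [List.drop_zero, zero_add]
  rw [← addHead_zero_append, greedy_eq_fRec _ hok 0 (Or.inl rfl)]
  rw [foldl_rev_eq_fRec]
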